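-- pv_equiv track=rewrite | github.com/zepheira/amara | amara/xslt/tree/sort_element.py | _lower_first_compare
-- ===== SOURCE A (Python) =====
-- def _lower_first_compare(a, b):
--     # case only matters if the strings are equal ignoring case
--     if a.lower() == b.lower():
--         for i, ch in enumerate(a):
--             if ch != b[i]:
--                 return ch.islower() and -1 or 1
--         # they are truly equal
--         return 0
--     else:
--         return cmp(a, b)
-- ===== SOURCE B (Python) =====
-- def _lower_first_compare(a, b):
--     # loop-free: when equal ignoring case, swapcase maps the lowercase variant to the
--     # smaller (uppercase) codepoint, so a plain lexicographic compare sorts lowercase first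
--     if a.lower() == b.lower():
--         a, b = a.swapcase(), b.swapcase()
--         return (a > b) - (a < b)
--     return cmp(a, b)
-- ===== Notes on version B (the rewrite author's own statement) =====
-- stated objective: simpler
-- what changed: Replaces the explicit enumerate/first-mismatch scan (and the 'islower() and -1 or 1' idiom) with a loop-free transform-then-compare: swapcase both strings when they are equal ignoring case, then one lexicographic three-way compare; the not-equal-ignoring-case branch (Python-2 cmp, a NameError under Python 3) is unchanged and excluded by Pre_.
import Mathlib
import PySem

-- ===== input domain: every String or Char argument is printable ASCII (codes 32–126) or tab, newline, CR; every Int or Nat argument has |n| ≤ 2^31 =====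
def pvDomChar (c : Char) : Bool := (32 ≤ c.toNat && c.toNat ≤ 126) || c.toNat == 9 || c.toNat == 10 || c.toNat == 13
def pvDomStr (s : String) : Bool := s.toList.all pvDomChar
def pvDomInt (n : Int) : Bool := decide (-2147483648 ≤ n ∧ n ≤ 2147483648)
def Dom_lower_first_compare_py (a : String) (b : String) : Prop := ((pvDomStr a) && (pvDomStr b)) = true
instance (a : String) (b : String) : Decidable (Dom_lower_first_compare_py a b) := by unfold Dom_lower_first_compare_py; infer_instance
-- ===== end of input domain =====

-- B replaces A's explicit first-mismatch scan with a loop-free swapcase-then-compare; proved equal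
-- wherever A returns (when the lowercased strings differ, both reach the Python-2 builtin `cmp` and raise NameError under Python 3).

-- ===== PORT A =====
-- the `for i, ch in enumerate(a): if ch != b[i]: return ch.islower() and -1 or 1` loop
def pvALoop (b : List Char) (i : Nat) : List Char → Int
  | [] => 0                                   -- loop finished: "they are truly equal"
  | ch :: rest =>
    match PySem.List.pyGet? b (i : Int) with
    | none => 0                               -- b[i] IndexError (unreachable: equal lowers have equal lengths)
    | some c =>
      if ch ≠ c then (if PySem.Chars.islower ch then -1 else 1)
      else pvALoop b (i + 1) rest

def lower_first_compare_py (a : String) (b : String) : Int :=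
  if PySem.Str.lower a == PySem.Str.lower b then
    pvALoop b.toList 0 a.toList
  else
    0  -- Python 3: `cmp(a, b)` raises NameError (Py2 builtin); excluded by Pre_

-- ===== PORT B =====
-- str.swapcase, exact on ASCII
def pvSwapChar (c : Char) : Char :=
  if PySem.Chars.islower c then PySem.Chars.upperChar c
  else if PySem.Chars.isupper c then PySem.Chars.lowerChar c
  else c

def pvSwapcase (s : List Char) : List Char := s.map pvSwapChar

def lower_first_compare_py_alt (a : String) (b : String) : Int :=
  if PySem.Str.lower a == PySem.Str.lower b then
    -- `a, b = a.swapcase(), b.swapcase(); return (a > b) - (a < b)`;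
    -- Python's str order is code-point lexicographic = Lean's < on List Char
    let x := pvSwapcase a.toList
    let y := pvSwapcase b.toList
    (if y < x then (1 : Int) else 0) - (if x < y then (1 : Int) else 0)
  else
    0  -- `cmp(a, b)`: Python-2 builtin, NameError under Python 3; excluded by Pre_

-- ===== PRECONDITION & SPEC =====
-- Pre_ excludes exactly the inputs where A raises: a.lower() != b.lower() reaches the
-- undefined Python-2 builtin `cmp` and raises NameError under Python 3.
def Pre_lower_first_compare_py (a : String) (b : String) : Prop :=
  PySem.Str.lower a = PySem.Str.lower b
instance (a : String) (b : String) : Decidable (Pre_lower_first_compare_py a b) := by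
  unfold Pre_lower_first_compare_py; infer_instance

def pvWitness_lower_first_compare_py : String × String := ("aB", "Ab")

def Spec_lower_first_compare_py (a : String) (b : String) (out : Int) : Prop := out = lower_first_compare_py_alt a b
instance (a : String) (b : String) (out : Int) : Decidable (Spec_lower_first_compare_py a b out) := by unfold Spec_lower_first_compare_py; infer_instance

-- ===== CLAIM (what is proved, stated in full; the proofs are below) =====
def Claim_equal_lower_first_compare_py : Prop := ∀ (a : String) (b : String), Dom_lower_first_compare_py a b → Pre_lower_first_compare_py a b → Spec_lower_first_compare_py a b (lower_first_compare_py a b)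

-- ===== LEMMAS AND PROOFS =====

-- zip-shaped view of A's indexed loop
def pvZ : List Char → List Char → Int
  | [], _ => 0
  | _ :: _, [] => 0
  | ch :: r, c :: ys' =>
    if ch ≠ c then (if PySem.Chars.islower ch then -1 else 1) else pvZ r ys'

lemma pvALoop_bridge : ∀ (xs pre zs : List Char),
    pvALoop (pre ++ zs) pre.length xs = pvZ xs zs := by
  intro xs
  induction xs with
  | nil => intro pre zs; cases zs <;> simp [pvALoop, pvZ]
  | cons ch r ih =>
    intro pre zs
    have hget : PySem.List.pyGet? (pre ++ zs) ((pre.length : Nat) : Int) = zs[0]? := by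
      rw [PySem.List.pyGet?_natCast, List.getElem?_append_right (Nat.le_refl _)]
      simp
    cases zs with
    | nil => simp [pvALoop, pvZ]
    | cons c zs' =>
      simp only [pvALoop, pvZ, hget, List.getElem?_cons_zero]
      by_cases h : ch = c
      · subst h
        rw [if_neg (not_not_intro rfl), if_neg (not_not_intro rfl)]
        have := ih (pre ++ [ch]) zs'
        simpa using this
      · rw [if_pos h, if_pos h]

-- Char arithmetic helpers for the per-character case analysis
lemma pvChLt {c d : Char} (h : c.toNat < d.toNat) : c < d := by
  rw [Char.lt_def, UInt32.lt_iff_toNat_lt]; exact h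

lemma pvChEq {c d : Char} (h : c.toNat = d.toNat) : c = d := by
  rw [← Char.ofNat_toNat c, ← Char.ofNat_toNat d, h]

lemma pvChValid (n : Nat) (h : n < 256) : (Char.ofNat n).toNat = n := by
  rw [Char.toNat_ofNat, if_pos]
  exact Or.inl (by omega)

lemma pvIslower_iff (c : Char) : PySem.Chars.islower c = true ↔ 97 ≤ c.toNat ∧ c.toNat ≤ 122 := by
  simp [PySem.Chars.islower, Char.le_def, UInt32.le_iff_toNat_le]

lemma pvIsupper_iff (c : Char) : PySem.Chars.isupper c = true ↔ 65 ≤ c.toNat ∧ c.toNat ≤ 90 := by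
  simp [PySem.Chars.isupper, Char.le_def, UInt32.le_iff_toNat_le]

lemma pvIslower_false (c : Char) (h : c.toNat < 97 ∨ 122 < c.toNat) :
    PySem.Chars.islower c = false := by
  cases hc : PySem.Chars.islower c with
  | false => rfl
  | true => have := (pvIslower_iff c).mp hc; omega

lemma pvCharCase (ch c : Char) (h1 : ch.toNat < 128) (h2 : c.toNat < 128)
    (hl : PySem.Chars.lowerChar ch = PySem.Chars.lowerChar c) (hne : ch ≠ c) :
    (PySem.Chars.islower ch = true → pvSwapChar ch < pvSwapChar c) ∧
    (PySem.Chars.islower ch = false → pvSwapChar c < pvSwapChar ch) := by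
  unfold PySem.Chars.lowerChar at hl
  by_cases hu1 : PySem.Chars.isupper ch = true <;> by_cases hu2 : PySem.Chars.isupper c = true
  · -- both uppercase: lowered values force ch = c, contradiction
    rw [if_pos hu1, if_pos hu2] at hl
    have hb1 := (pvIsupper_iff ch).mp hu1
    have hb2 := (pvIsupper_iff c).mp hu2
    have he : ch.toNat + 32 = c.toNat + 32 := by
      have := congrArg Char.toNat hl
      rwa [pvChValid _ (by omega), pvChValid _ (by omega)] at this
    exact absurd (pvChEq (by omega)) hne
  · -- ch uppercase, c its lowercase twin
    rw [if_pos hu1, if_neg hu2] at hl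
    have hb1 := (pvIsupper_iff ch).mp hu1
    have hm : c.toNat = ch.toNat + 32 := by
      have h' := congrArg Char.toNat hl
      rw [pvChValid _ (by omega)] at h'
      omega
    have hlc : PySem.Chars.islower c = true := (pvIslower_iff c).mpr (by omega)
    have hlch : PySem.Chars.islower ch = false := pvIslower_false ch (by omega)
    refine ⟨fun hh => ?_, fun _ => ?_⟩
    · rw [hlch] at hh; exact Bool.noConfusion hh
    · apply pvChLt
      simp only [pvSwapChar, hlc, hlch, hu1, if_true, Bool.false_eq_true, if_false]
      unfold PySem.Chars.upperChar PySem.Chars.lowerChar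
      rw [if_pos hlc, if_pos hu1, pvChValid _ (by omega), pvChValid _ (by omega)]
      omega
  · -- c uppercase, ch its lowercase twin
    rw [if_neg hu1, if_pos hu2] at hl
    have hb2 := (pvIsupper_iff c).mp hu2
    have hm : ch.toNat = c.toNat + 32 := by
      have h' := congrArg Char.toNat hl
      rw [pvChValid _ (by omega)] at h'
      omega
    have hlch : PySem.Chars.islower ch = true := (pvIslower_iff ch).mpr (by omega)
    have hlc : PySem.Chars.islower c = false := pvIslower_false c (by omega)
    refine ⟨fun _ => ?_, fun hh => ?_⟩
    · apply pvChLt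
      simp only [pvSwapChar, hlc, hlch, hu2, if_true, Bool.false_eq_true, if_false]
      unfold PySem.Chars.upperChar PySem.Chars.lowerChar
      rw [if_pos hlch, if_pos hu2, pvChValid _ (by omega), pvChValid _ (by omega)]
      omega
    · rw [hlch] at hh; exact Bool.noConfusion hh
  · -- neither uppercase: lowerChar is the identity, so ch = c, contradiction
    rw [if_neg hu1, if_neg hu2] at hl
    exact absurd hl hne

lemma pvAsciiBound (c : Char) (h : pvDomChar c = true) : c.toNat < 128 := by
  simp [pvDomChar] at h
  omega

lemma pvMain : ∀ (xs ys : List Char), (∀ c ∈ xs, pvDomChar c = true) → (∀ c ∈ ys, pvDomChar c = true) →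
    PySem.Chars.lower xs = PySem.Chars.lower ys →
    pvZ xs ys = (if pvSwapcase ys < pvSwapcase xs then (1 : Int) else 0) -
                (if pvSwapcase xs < pvSwapcase ys then (1 : Int) else 0) := by
  intro xs
  induction xs with
  | nil =>
    intro ys _ _ hlow
    have : ys = [] := by
      cases ys with
      | nil => rfl
      | cons c t => simp [PySem.Chars.lower] at hlow
    subst this
    simp [pvZ, pvSwapcase]
  | cons ch r ih =>
    intro ys hdx hdy hlow
    cases ys with
    | nil => simp [PySem.Chars.lower] at hlow
    | cons c ys' =>
      simp only [PySem.Chars.lower, List.map_cons, List.cons.injEq] at hlow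
      obtain ⟨hhead, htail⟩ := hlow
      by_cases h : ch = c
      · subst h
        have ihh := ih ys' (fun x hx => hdx x (List.mem_cons_of_mem _ hx))
          (fun x hx => hdy x (List.mem_cons_of_mem _ hx)) htail
        have hz : pvZ (ch :: r) (ch :: ys') = pvZ r ys' := by
          simp [pvZ]
        have h1 : (pvSwapcase (ch :: ys') < pvSwapcase (ch :: r)) ↔ (pvSwapcase ys' < pvSwapcase r) := by
          simp [pvSwapcase]
        have h2 : (pvSwapcase (ch :: r) < pvSwapcase (ch :: ys')) ↔ (pvSwapcase r < pvSwapcase ys') := by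
          simp [pvSwapcase]
        rw [hz, ihh, if_congr h1 rfl rfl, if_congr h2 rfl rfl]
      · have hc1 := pvAsciiBound ch (hdx ch List.mem_cons_self)
        have hc2 := pvAsciiBound c (hdy c List.mem_cons_self)
        obtain ⟨hlo, hhi⟩ := pvCharCase ch c hc1 hc2 hhead h
        have hz : pvZ (ch :: r) (c :: ys') = (if PySem.Chars.islower ch then -1 else 1) := by
          simp [pvZ, h]
        rw [hz]
        cases hl : PySem.Chars.islower ch with
        | true =>
          have hlt := hlo hl
          have hnot : ¬ (pvSwapcase (c :: ys') < pvSwapcase (ch :: r)) := by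
            simp only [pvSwapcase, List.map_cons, List.cons_lt_cons_iff]
            rintro (h' | ⟨h', -⟩)
            · exact absurd hlt (lt_asymm h')
            · exact absurd (h' ▸ hlt) (lt_irrefl _)
          have hyes : pvSwapcase (ch :: r) < pvSwapcase (c :: ys') := by
            simp only [pvSwapcase, List.map_cons, List.cons_lt_cons_iff]
            exact Or.inl hlt
          rw [if_neg hnot, if_pos hyes]
          norm_num
        | false =>
          have hlt := hhi hl
          have hyes : pvSwapcase (c :: ys') < pvSwapcase (ch :: r) := by
            simp only [pvSwapcase, List.map_cons, List.cons_lt_cons_iff]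
            exact Or.inl hlt
          have hnot : ¬ (pvSwapcase (ch :: r) < pvSwapcase (c :: ys')) := by
            simp only [pvSwapcase, List.map_cons, List.cons_lt_cons_iff]
            rintro (h' | ⟨h', -⟩)
            · exact absurd hlt (lt_asymm h')
            · exact absurd (h' ▸ hlt) (lt_irrefl _)
          rw [if_pos hyes, if_neg hnot]
          norm_num

-- ===== VERDICT (by name: the statement is the Claim_ definition above) =====
theorem lower_first_compare_py_spec : Claim_equal_lower_first_compare_py := by
  intro a b hdom hpre
  unfold Spec_lower_first_compare_py lower_first_compare_py lower_first_compare_py_alt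
  have hbeq : (PySem.Str.lower a == PySem.Str.lower b) = true := by
    exact beq_iff_eq.mpr hpre
  rw [hbeq]
  simp only [if_true]
  have hlow : PySem.Chars.lower a.toList = PySem.Chars.lower b.toList := by
    have := congrArg String.toList hpre
    simpa [PySem.Str.toList_lower] using this
  have hdom' : (pvDomStr a && pvDomStr b) = true := hdom
  have hda : ∀ c ∈ a.toList, pvDomChar c = true := by
    intro c hc
    have : pvDomStr a = true := by
      cases h : pvDomStr a <;> simp [h] at hdom' ⊢
    exact List.all_eq_true.mp this c hc
  have hdb : ∀ c ∈ b.toList, pvDomChar c = true := by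
    intro c hc
    have : pvDomStr b = true := by
      cases h : pvDomStr b <;> simp [h] at hdom' ⊢
    exact List.all_eq_true.mp this c hc
  have hbridge : pvALoop b.toList 0 a.toList = pvZ a.toList b.toList := by
    have := pvALoop_bridge a.toList [] b.toList
    simpa using this
  rw [hbridge]
  exact pvMain a.toList b.toList hda hdb hlow
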